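-- pv_equiv track=rewrite | github.com/notmike101/coding-challenges | other/hack-reactor/intersection-of-arrays/main.py | getIntersectingValues
-- ===== SOURCE A (Python) =====
-- def getIntersectingValues(nums):
--   fullNumList = []
--   letterCounts = {}
--   lengthOfNums = len(nums)
--   output = []
--
--   for numList in nums:
--     for num in numList:
--       fullNumList.append(num)
--
--   for num in fullNumList:
--     if num in letterCounts.keys():
--       letterCounts[num] += 1
--     else:
--       letterCounts[num] = 1
--
--   for num, count in letterCounts.items():
--     if count >= lengthOfNums:
--       output.append(num)
--
--   output.sort()
--
--   return output
-- ===== SOURCE B (Python) =====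
-- def getIntersectingValues(nums):
--   n = len(nums)
--   distinct = []
--   for sub in nums:
--     for v in sub:
--       if v not in distinct:
--         distinct.append(v)
--   output = [v for v in distinct if sum(sub.count(v) for sub in nums) >= n]
--   output.sort()
--   return output
-- ===== Notes on version B (the rewrite author's own statement) =====
-- stated objective: simpler
-- what changed: B keeps no running count dictionary: it collects the distinct values in first-occurrence order, then for each one re-scans the sublists summing sub.count(v) to decide membership, and sorts only the qualifying values.
import Mathlib
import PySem

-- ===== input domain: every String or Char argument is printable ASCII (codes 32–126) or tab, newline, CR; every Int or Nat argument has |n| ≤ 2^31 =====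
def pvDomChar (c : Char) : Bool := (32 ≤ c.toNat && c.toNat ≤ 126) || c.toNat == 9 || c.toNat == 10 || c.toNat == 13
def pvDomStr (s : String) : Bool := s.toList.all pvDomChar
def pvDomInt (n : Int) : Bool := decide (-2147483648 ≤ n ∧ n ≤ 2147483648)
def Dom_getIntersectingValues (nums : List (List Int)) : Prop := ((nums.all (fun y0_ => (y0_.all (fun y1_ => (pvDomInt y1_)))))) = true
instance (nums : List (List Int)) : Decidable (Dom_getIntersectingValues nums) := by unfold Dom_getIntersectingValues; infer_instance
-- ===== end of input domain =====

-- B drops A's running count dictionary: it collects distinct values in first-occurrence order,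
-- re-scans the sublists per value to total its multiplicity, and sorts only the qualifying values (simpler decomposition, same results).


-- ===== PORT A =====
def getIntersectingValues (nums : List (List Int)) : List Int :=
  let fullNumList : List Int :=
    nums.foldl (fun acc numList => numList.foldl (fun acc num => acc ++ [num]) acc) []
  let letterCounts : PySem.Dict Int Int :=
    fullNumList.foldl (fun d num =>
      if d.contains num then d.insert num (d.getD num 0 + 1) else d.insert num 1)
      PySem.Dict.empty
  let lengthOfNums : Int := (nums.length : Int)
  let output : List Int :=
    letterCounts.items.foldl (fun out p => if lengthOfNums ≤ p.2 then out ++ [p.1] else out) []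
  PySem.List.sorted output id

-- ===== PORT B =====
def getIntersectingValues_alt (nums : List (List Int)) : List Int :=
  let n := nums.length
  let distinct : PySem.Set Int :=
    nums.foldl (fun s sub => sub.foldl PySem.Set.add s) PySem.Set.empty
  let output : List Int :=
    distinct.filter (fun v => decide (n ≤ (nums.map (fun sub => sub.count v)).sum))
  PySem.List.sorted output id

-- ===== PRECONDITION & SPEC =====
def Spec_getIntersectingValues (nums : List (List Int)) (out : List Int) : Prop := out = getIntersectingValues_alt nums
instance (nums : List (List Int)) (out : List Int) : Decidable (Spec_getIntersectingValues nums out) := by unfold Spec_getIntersectingValues; infer_instance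

-- ===== CLAIM (what is proved, stated in full; the proofs are below) =====
def Claim_equal_getIntersectingValues : Prop := ∀ (nums : List (List Int)), Dom_getIntersectingValues nums → Spec_getIntersectingValues nums (getIntersectingValues nums)

-- ===== LEMMAS AND PROOFS =====

-- A's nested append loop builds the flattened list.
theorem pv_flatten_eq (nums : List (List Int)) :
    nums.foldl (fun acc numList => numList.foldl (fun acc num => acc ++ [num]) acc) [] =
      nums.flatMap id := by
  have h1 : (fun (acc numList : List Int) => numList.foldl (fun acc num => acc ++ [num]) acc)
      = fun acc numList => acc ++ id numList := by
    funext acc l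
    simpa using PySem.List.foldl_append_eq_flatMap (fun x => [x]) l acc
  rw [h1]
  simpa using PySem.List.foldl_append_eq_flatMap (id : List Int → List Int) nums []

-- A's branching count loop is the counter fold.
theorem pv_count_step_eq :
    (fun (d : PySem.Dict Int Int) num =>
        if d.contains num then d.insert num (d.getD num 0 + 1) else d.insert num 1)
      = fun d num => d.insert num (d.getD num 0 + 1) := by
  funext d num
  by_cases h : d.contains num
  · simp [h]
  · simp only [h, if_neg Bool.false_ne_true]
    have : d.getD num 0 = 0 := by
      simp [pysem, h]
    simp [this]

-- B's nested set loop folds Set.add over the flattened list.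
theorem pv_setfold_eq (nums : List (List Int)) (s0 : PySem.Set Int) :
    nums.foldl (fun s sub => sub.foldl PySem.Set.add s) s0 =
      (nums.flatMap id).foldl PySem.Set.add s0 := by
  induction nums generalizing s0 with
  | nil => rfl
  | cons a t ih => simp [List.flatMap_cons, List.foldl_append, ih]

-- total multiplicity across the sublists = count in the flattened list
theorem pv_count_flat (nums : List (List Int)) (v : Int) :
    (nums.flatMap id).count v = (nums.map (fun sub => sub.count v)).sum := by
  induction nums with
  | nil => rfl
  | cons a t ih => rw [List.flatMap_cons, List.count_append, ih, List.map_cons, List.sum_cons]; rfl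

-- ===== VERDICT (by name: the statement is the Claim_ definition above) =====
theorem getIntersectingValues_spec : Claim_equal_getIntersectingValues := by
  intro nums _
  unfold Spec_getIntersectingValues getIntersectingValues getIntersectingValues_alt
  simp only [pv_flatten_eq, pv_count_step_eq, pv_setfold_eq,
    PySem.Dict.foldl_insert_getD_add_one_eq_counter]
  set flat := nums.flatMap id with hflat
  have hitems := PySem.Dict.items_counter (κ := Int) flat
  rw [hitems]
  have hfold := PySem.List.foldl_append_if
      (fun q : Int × Int => decide ((nums.length : Int) ≤ q.2)) (fun q => q.1)
      ((PySem.Set.ofList flat).map (fun k => (k, (flat.count k : Int)))) []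
  simp only [decide_eq_true_eq] at hfold
  rw [hfold]
  simp only [List.nil_append, List.filter_map, List.map_map, Function.comp_def]
  have hpred : ∀ v ∈ PySem.Set.ofList flat,
      (decide ((nums.length : Int) ≤ (flat.count v : Int)))
        = decide (nums.length ≤ (nums.map (fun sub => sub.count v)).sum) := by
    intro v _
    simp only [← pv_count_flat nums v, ← hflat]
    by_cases h : nums.length ≤ flat.count v
    · simp [h, Int.ofNat_le.mpr h]
    · have : ¬ ((nums.length : Int) ≤ (flat.count v : Int)) := by exact_mod_cast h
      simp [h, this]
  rw [List.filter_congr hpred]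
  simp [PySem.Set.ofList]
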